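-- pv_equiv track=rewrite | github.com/atakux/Compiler_Project | check_arithmetic.py | get_expressions
-- ===== SOURCE A (Python) =====
-- def get_expressions(text):
-- 	""" Get all expressions from a given string of text and separate them by white space """
--
-- 	# initialize
-- 	expressions = []
-- 	stop_reading = False
-- 	operators = ['+', '-', '*', '/', '=', '(', ')']
--
-- 	# get all expressions in the text
-- 	for word in text:
--
-- 		# when word is begin, we can grab all expressions
-- 		if word == 'begin':
-- 			k = text.index(word)
-- 			for w in range(k + 1, len(text)):
--
-- 				# skip everything to do with display
-- 				if 'display' in text[w]:
-- 					stop_reading = True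
--
-- 				elif ';' in text[w]:
-- 					stop_reading = False
-- 					expressions.append(';')
-- 				elif text[w] == 'end.':
-- 					break
--
-- 				# append everything else to the expressions list
-- 				elif not stop_reading:
-- 					expressions.append(text[w])
--
-- 	# remove all semicolons from the expressions
-- 	expressions = ''.join(expressions)
-- 	expressions = expressions.split(';')
--
-- 	# remove any extra spaces in the list
-- 	while "" in expressions:
-- 		expressions.remove("")
--
-- 	# space out the expressions by operator
-- 	spaced_exprs = []
--
-- 	for expr in expressions:
-- 		for op in operators:
-- 			expr = expr.split(op)
-- 			expr = f' {op} '.join(expr)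
-- 		spaced_exprs.append(expr)
--
-- 	# return spaced out expressions
-- 	return spaced_exprs
-- ===== SOURCE B (Python) =====
-- _SPACED = str.maketrans({c: f' {c} ' for c in '+-*/=()'})
--
--
-- def get_expressions(text):
--     """ Get all expressions from a given string of text and separate them by white space """
--     expressions = []
--     buf = ''
--     stop_reading = False
--     for word in text:
--         if word == 'begin':
--             for w in text[text.index('begin') + 1:]:
--                 if 'display' in w:
--                     stop_reading = True
--                 elif ';' in w:
--                     stop_reading = False
--                     if buf:
--                         expressions.append(buf.translate(_SPACED))
--                     buf = ''
--                 elif w == 'end.':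
--                     break
--                 elif not stop_reading:
--                     buf += w
--     if buf:
--         expressions.append(buf.translate(_SPACED))
--     return expressions
-- ===== Notes on version B (the rewrite author's own statement) =====
-- stated objective: simpler
-- what changed: B keeps the same scan over the words but replaces A's flat token list + ''.join + split(';') + while-remove + 7-pass split/join operator fold by a persistent running buffer flushed into the result on ';' (final flush after the loop), spacing operators in one pass with a str.translate table.
import Mathlib
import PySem

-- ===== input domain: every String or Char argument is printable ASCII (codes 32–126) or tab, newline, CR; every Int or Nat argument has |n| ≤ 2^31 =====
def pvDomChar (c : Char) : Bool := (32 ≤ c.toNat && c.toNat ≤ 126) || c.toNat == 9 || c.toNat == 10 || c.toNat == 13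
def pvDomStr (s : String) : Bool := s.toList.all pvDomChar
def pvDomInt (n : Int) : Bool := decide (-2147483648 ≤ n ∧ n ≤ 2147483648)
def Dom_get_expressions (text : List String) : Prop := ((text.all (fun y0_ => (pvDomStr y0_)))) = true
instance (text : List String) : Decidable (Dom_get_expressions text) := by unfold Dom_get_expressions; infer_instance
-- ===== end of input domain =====

-- B keeps the scan but replaces A's token list + ''.join + split(';') + while-remove +
-- 7-pass split/join operator fold by a running buffer flushed into the result on ';',
-- spacing operators in one pass with a translation table; objective "simpler".

-- ===== PORT A =====
-- operators = ['+', '-', '*', '/', '=', '(', ')']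
def pvOpsA : List String := ["+", "-", "*", "/", "=", "(", ")"]

-- inner 'for w in range(k+1, len(text))' loop; returns (expressions, stop_reading); break returns early
def pvInnerA (text : List String) : List Int → List String → Bool → (List String × Bool)
  | [], exprs, stop => (exprs, stop)
  | i :: is, exprs, stop =>
    let w := PySem.List.pyGetD text i ""    -- text[w]; every index produced by range(k+1, len) is in range
    if PySem.Str.isIn "display" w then pvInnerA text is exprs true
    else if PySem.Str.isIn ";" w then pvInnerA text is (exprs ++ [";"]) false
    else if w == "end." then (exprs, stop)
    else if !stop then pvInnerA text is (exprs ++ [w]) stop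
    else pvInnerA text is exprs stop

-- outer 'for word in text' loop, carrying (expressions, stop_reading)
def pvOuterA (text : List String) : List String → List String × Bool → List String × Bool
  | [], st => st
  | word :: ws, st =>
    if word == "begin" then
      match PySem.List.index? text word with
      | some k =>
          pvOuterA text ws (pvInnerA text (PySem.List.pyRange ((k : Int) + 1) (text.length : Int)) st.1 st.2)
      | none => pvOuterA text ws st      -- unreachable: word was drawn from text
    else pvOuterA text ws st

-- 'while "" in expressions: expressions.remove("")'
def pvRemoveEmpty (l : List String) : List String :=
  if h : "" ∈ l then
    match hm : PySem.List.remove? l "" with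
    | some l' => pvRemoveEmpty l'
    | none => l
  else l
termination_by l.length
decreasing_by
  rw [PySem.List.remove?_eq_some_erase l "" h] at hm
  cases hm
  have h1 := List.length_erase_of_mem h
  have h2 := List.length_pos_of_mem h
  omega

-- 'for op in operators: expr = f" {op} ".join(expr.split(op))'
def pvSpaceA (expr : String) : String :=
  pvOpsA.foldl (fun e op => PySem.Str.join (" " ++ op ++ " ") ((PySem.Str.split? e op).getD [])) expr

def get_expressions (text : List String) : List String :=
  let st := pvOuterA text text ([], false)
  let joined := PySem.Str.join "" st.1
  let exprs := (PySem.Str.split? joined ";").getD []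
  let exprs := pvRemoveEmpty exprs
  exprs.map pvSpaceA

-- ===== PORT B =====
-- _SPACED = str.maketrans({c: f' {c} ' for c in '+-*/=()'})
def pvOpsB : List Char := ['+', '-', '*', '/', '=', '(', ')']

-- buf.translate(_SPACED): each operator char maps to ' c ', every other char to itself
def pvSpaceB (buf : List Char) : List Char :=
  buf.flatMap (fun c => if c ∈ pvOpsB then [' ', c, ' '] else [c])

-- 'if buf: expressions.append(buf.translate(_SPACED))'
def pvFlush1 (exprs : List String) (buf : List Char) : List String :=
  if buf.isEmpty then exprs else exprs ++ [String.ofList (pvSpaceB buf)]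

-- inner 'for w in text[text.index("begin")+1:]' loop, carrying (expressions, buf, stop_reading);
-- break returns the current state
def pvInnerB : List String → List String × List Char × Bool → List String × List Char × Bool
  | [], st => st
  | w :: ws, (exprs, buf, stop) =>
    if PySem.Str.isIn "display" w then pvInnerB ws (exprs, buf, true)
    else if PySem.Str.isIn ";" w then pvInnerB ws (pvFlush1 exprs buf, [], false)
    else if w == "end." then (exprs, buf, stop)
    else if !stop then pvInnerB ws (exprs, buf ++ w.toList, stop)
    else pvInnerB ws (exprs, buf, stop)

-- outer 'for word in text' loop
def pvOuterB (text : List String) : List String → List String × List Char × Bool → List String × List Char × Bool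
  | [], st => st
  | word :: ws, st =>
    if word == "begin" then
      match PySem.List.index? text word with
      | some k => pvOuterB text ws (pvInnerB (PySem.List.slice text (some ((k : Int) + 1)) none) st)
      | none => pvOuterB text ws st      -- unreachable: word was drawn from text
    else pvOuterB text ws st

def get_expressions_alt (text : List String) : List String :=
  let st := pvOuterB text text ([], [], false)
  pvFlush1 st.1 st.2.1

-- ===== PRECONDITION & SPEC =====
def Spec_get_expressions (text : List String) (out : List String) : Prop := out = get_expressions_alt text
instance (text : List String) (out : List String) : Decidable (Spec_get_expressions text out) := by unfold Spec_get_expressions; infer_instance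

-- ===== CLAIM (what is proved, stated in full; the proofs are below) =====
def Claim_equal_get_expressions : Prop := ∀ (text : List String), Dom_get_expressions text → Spec_get_expressions text (get_expressions text)

-- ===== LEMMAS AND PROOFS =====

-- proof-side token scan: B's loop with the flushing abstracted away (none = ';' separator)
def pvScanB : List String → List (Option String) → Bool → (List (Option String) × Bool)
  | [], toks, stop => (toks, stop)
  | w :: ws, toks, stop =>
    if PySem.Str.isIn "display" w then pvScanB ws toks true
    else if PySem.Str.isIn ";" w then pvScanB ws (toks ++ [none]) false
    else if w == "end." then (toks, stop)
    else if !stop then pvScanB ws (toks ++ [some w]) stop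
    else pvScanB ws toks stop

-- proof-side flushing over a token list
def pvFlushB : List (Option String) → List String → List Char → List String
  | [], exprs, buf => if buf.isEmpty then exprs else exprs ++ [String.ofList (pvSpaceB buf)]
  | none :: ts, exprs, buf =>
      if buf.isEmpty then pvFlushB ts exprs []
      else pvFlushB ts (exprs ++ [String.ofList (pvSpaceB buf)]) []
  | some w :: ts, exprs, buf => pvFlushB ts exprs (buf ++ w.toList)

-- σ maps a token (none = separator) to A's appended string
def pvSig (t : Option String) : String := t.getD ";"

-- state evolution of the scan
def pvFin : List String → Bool → Bool
  | [], s => s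
  | w :: ws, s =>
    if PySem.Str.isIn "display" w then pvFin ws true
    else if PySem.Str.isIn ";" w then pvFin ws false
    else if w == "end." then s
    else pvFin ws s

theorem pvScanB_acc (ws : List String) : ∀ toks stop,
    pvScanB ws toks stop = (toks ++ (pvScanB ws [] stop).1, (pvScanB ws [] stop).2) := by
  induction ws with
  | nil => intro toks stop; simp [pvScanB]
  | cons w ws ih =>
    intro toks stop
    simp only [pvScanB, List.nil_append]
    split_ifs with d1 d2 d3 d4
    · exact ih toks true
    · rw [ih (toks ++ [none]) false, ih [none] false]; simp
    · simp
    · rw [ih (toks ++ [some w]) stop, ih [some w] stop]; simp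
    · exact ih toks stop

-- inner loop of A over range(j, len) = the token scan over text.drop j (tokens mapped through σ)
theorem pvInnerA_eq_scan (text : List String) : ∀ j exprs stop, j ≤ text.length →
    pvInnerA text (PySem.List.pyRange (j : Int) (text.length : Int)) exprs stop
      = (exprs ++ (pvScanB (text.drop j) [] stop).1.map pvSig, pvFin (text.drop j) stop) := by
  suffices H : ∀ d j exprs stop, text.length - j = d → j ≤ text.length →
      pvInnerA text (PySem.List.pyRange (j : Int) (text.length : Int)) exprs stop
        = (exprs ++ (pvScanB (text.drop j) [] stop).1.map pvSig, pvFin (text.drop j) stop) from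
    fun j exprs stop hj => H _ j exprs stop rfl hj
  intro d
  induction d with
  | zero =>
    intro j exprs stop hd hj
    have hj' : j = text.length := by omega
    subst hj'
    rw [PySem.List.pyRange_one_eq_nil (le_refl _), List.drop_length]
    simp [pvInnerA, pvScanB, pvFin]
  | succ d ih =>
    intro j exprs stop hd hj
    have hlt : j < text.length := by omega
    have hlt' : (j : Int) < (text.length : Int) := by exact_mod_cast hlt
    have hcast : (j : Int) + 1 = ((j + 1 : Nat) : Int) := by push_cast; ring
    have hw : PySem.List.pyGetD text (j : Int) "" = text[j] := by
      rw [PySem.List.pyGetD_natCast, List.getD_eq_getElem text "" hlt]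
    have hih := fun exprs stop => ih (j + 1) exprs stop (by omega) (by omega)
    rw [PySem.List.pyRange_one_cons hlt', List.drop_eq_getElem_cons hlt]
    simp only [pvInnerA, hw, hcast, pvScanB, pvFin, List.nil_append]
    split_ifs with h1 h2 h3 h4
    · exact hih exprs true
    · rw [hih (exprs ++ [";"]) false, pvScanB_acc (text.drop (j + 1)) [none] false]
      simp [pvSig]
    · simp
    · rw [hih (exprs ++ [text[j]]) stop, pvScanB_acc (text.drop (j + 1)) [some text[j]] stop]
      simp [pvSig]
    · exact hih exprs stop

-- proof-side: scan state evolution threaded through flushing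
def pvFlushSt : List (Option String) → List String × List Char → List String × List Char
  | [], st => st
  | none :: ts, st => pvFlushSt ts (pvFlush1 st.1 st.2, [])
  | some w :: ts, st => pvFlushSt ts (st.1, st.2 ++ w.toList)

theorem pvFlushSt_append (ts ts' : List (Option String)) : ∀ st,
    pvFlushSt (ts ++ ts') st = pvFlushSt ts' (pvFlushSt ts st) := by
  induction ts with
  | nil => intro st; rfl
  | cons t ts ih =>
    intro st
    cases t <;> simp only [List.cons_append, pvFlushSt] <;> exact ih _

-- the flush of a token list = final flush of the threaded state
theorem pvFlushB_viaSt (ts : List (Option String)) : ∀ e b,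
    pvFlushB ts e b = pvFlush1 (pvFlushSt ts (e, b)).1 (pvFlushSt ts (e, b)).2 := by
  induction ts with
  | nil => intro e b; simp [pvFlushB, pvFlushSt, pvFlush1]
  | cons t ts ih =>
    intro e b
    cases t with
    | none =>
      by_cases hb : b.isEmpty = true
      · simp only [pvFlushB, pvFlushSt, hb, if_true]
        rw [ih, show pvFlush1 e b = e from by simp [pvFlush1, hb]]
      · simp only [Bool.not_eq_true] at hb
        simp only [pvFlushB, pvFlushSt, hb, Bool.false_eq_true, if_false]
        rw [ih, show pvFlush1 e b = e ++ [String.ofList (pvSpaceB b)] from by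
            simp [pvFlush1, hb]]
    | some w => simp only [pvFlushB, pvFlushSt]; exact ih _ _

-- B's inner loop = flushing the scanned tokens, with pvFin's stop state
theorem pvInnerB_eq (ws : List String) : ∀ e b s,
    pvInnerB ws (e, b, s)
      = ((pvFlushSt (pvScanB ws [] s).1 (e, b)).1,
         (pvFlushSt (pvScanB ws [] s).1 (e, b)).2, pvFin ws s) := by
  induction ws with
  | nil => intro e b s; simp [pvInnerB, pvScanB, pvFlushSt, pvFin]
  | cons w ws ih =>
    intro e b s
    simp only [pvInnerB, pvScanB, pvFin, List.nil_append]
    split_ifs with d1 d2 d3 d4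
    · exact ih e b true
    · rw [ih (pvFlush1 e b) [] false, pvScanB_acc ws [none] false]
      simp [pvFlushSt_append, pvFlushSt]
    · simp [pvFlushSt]
    · rw [ih e (b ++ w.toList) s, pvScanB_acc ws [some w] s]
      simp [pvFlushSt_append, pvFlushSt]
    · exact ih e b s

-- proof-side: concatenated token scans of A's outer loop, one per 'begin' occurrence
def pvRunsT (tail : List String) : Nat → Bool → List (Option String) × Bool
  | 0, s => ([], s)
  | n + 1, s =>
    ((pvScanB tail [] s).1 ++ (pvRunsT tail n (pvFin tail s)).1,
     (pvRunsT tail n (pvFin tail s)).2)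

theorem pvOuterA_eq_runs (text : List String) (k : Nat)
    (hk : PySem.List.index? text "begin" = some k) :
    ∀ ws exprs stop,
    pvOuterA text ws (exprs, stop)
      = (exprs ++ (pvRunsT (text.drop (k + 1)) (ws.count "begin") stop).1.map pvSig,
         (pvRunsT (text.drop (k + 1)) (ws.count "begin") stop).2) := by
  obtain ⟨hklen, -, -⟩ := PySem.List.getElem_of_index?_eq_some hk
  intro ws
  induction ws with
  | nil => intro exprs stop; simp [pvOuterA, pvRunsT]
  | cons word ws ih =>
    intro exprs stop
    by_cases hb : word == "begin"
    · have hbe : word = "begin" := by simpa using hb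
      subst hbe
      rw [show pvOuterA text ("begin" :: ws) (exprs, stop)
            = pvOuterA text ws (pvInnerA text
                (PySem.List.pyRange ((k : Int) + 1) (text.length : Int)) exprs stop) from by
          simp only [pvOuterA, if_pos hb, hk]]
      have hcast : (k : Int) + 1 = ((k + 1 : Nat) : Int) := by push_cast; ring
      rw [hcast, pvInnerA_eq_scan text (k + 1) exprs stop (by omega), ih]
      rw [List.count_cons_self]
      simp [pvRunsT]
    · rw [show pvOuterA text (word :: ws) (exprs, stop) = pvOuterA text ws (exprs, stop) from by
          simp only [pvOuterA, if_neg hb]]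
      rw [ih, List.count_cons, if_neg hb]
      simp

-- B's outer loop = the same concatenated scans threaded through the flushing state
theorem pvOuterB_eq_runs (text : List String) (k : Nat)
    (hk : PySem.List.index? text "begin" = some k) :
    ∀ ws e b s,
    pvOuterB text ws (e, b, s)
      = ((pvFlushSt (pvRunsT (text.drop (k + 1)) (ws.count "begin") s).1 (e, b)).1,
         (pvFlushSt (pvRunsT (text.drop (k + 1)) (ws.count "begin") s).1 (e, b)).2,
         (pvRunsT (text.drop (k + 1)) (ws.count "begin") s).2) := by
  obtain ⟨hklen, -, -⟩ := PySem.List.getElem_of_index?_eq_some hk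
  have hslice : PySem.List.slice text (some ((k : Int) + 1)) none = text.drop (k + 1) := by
    rw [show (k : Int) + 1 = ((k + 1 : Nat) : Int) from by push_cast; ring,
      PySem.List.slice_from_natCast]
  intro ws
  induction ws with
  | nil => intro e b s; simp [pvOuterB, pvRunsT, pvFlushSt]
  | cons word ws ih =>
    intro e b s
    by_cases hb : word == "begin"
    · have hbe : word = "begin" := by simpa using hb
      subst hbe
      rw [show pvOuterB text ("begin" :: ws) (e, b, s)
            = pvOuterB text ws (pvInnerB (PySem.List.slice text (some ((k : Int) + 1)) none)
                (e, b, s)) from by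
          simp only [pvOuterB, if_pos hb, hk]]
      rw [hslice, pvInnerB_eq, ih]
      rw [List.count_cons_self]
      simp [pvRunsT, pvFlushSt_append]
    · rw [show pvOuterB text (word :: ws) (e, b, s) = pvOuterB text ws (e, b, s) from by
          simp only [pvOuterB, if_neg hb]]
      rw [ih, List.count_cons, if_neg hb]
      simp

theorem pvOuterB_no_begin (text : List String) : ∀ ws st, "begin" ∉ ws →
    pvOuterB text ws st = st := by
  intro ws
  induction ws with
  | nil => intro st _; rfl
  | cons word ws ih =>
    intro st hmem
    have hb : ¬(word == "begin") := by
      simp only [beq_iff_eq]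
      intro h; exact hmem (h ▸ List.mem_cons_self)
    rw [show pvOuterB text (word :: ws) st = pvOuterB text ws st from by
        simp only [pvOuterB, if_neg hb]]
    exact ih st (fun h => hmem (List.mem_cons_of_mem _ h))

theorem pvOuterA_no_begin (text : List String) : ∀ ws st, "begin" ∉ ws →
    pvOuterA text ws st = st := by
  intro ws
  induction ws with
  | nil => intro st _; rfl
  | cons word ws ih =>
    intro st hmem
    have hb : ¬(word == "begin") := by
      simp only [beq_iff_eq]
      intro h; exact hmem (h ▸ List.mem_cons_self)
    rw [show pvOuterA text (word :: ws) st = pvOuterA text ws st from by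
        simp only [pvOuterA, if_neg hb]]
    exact ih st (fun h => hmem (List.mem_cons_of_mem _ h))

-- every non-separator token produced by the scan contains no ';'
def pvNoSemi (t : Option String) : Prop := ∀ w, t = some w → ';' ∉ w.toList

theorem pvScanB_noSemi (ws : List String) : ∀ toks stop,
    (∀ t ∈ toks, pvNoSemi t) → ∀ t ∈ (pvScanB ws toks stop).1, pvNoSemi t := by
  induction ws with
  | nil => intro toks stop h; simpa [pvScanB] using h
  | cons w ws ih =>
    intro toks stop h
    simp only [pvScanB]
    split_ifs with h1 h2 h3 h4
    · exact ih toks true h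
    · refine ih (toks ++ [none]) false ?_
      intro t ht
      rcases List.mem_append.1 ht with ht | ht
      · exact h t ht
      · simp at ht; subst ht; intro v hv; cases hv
    · simpa using h
    · refine ih (toks ++ [some w]) stop ?_
      intro t ht
      rcases List.mem_append.1 ht with ht | ht
      · exact h t ht
      · simp at ht; subst ht
        intro v hv hmem
        cases hv
        apply h2
        have hinf : [';'] <:+: w.toList := (List.singleton_infix_iff _ _).2 hmem
        show PySem.Chars.isIn (";" : String).toList w.toList = true
        rw [show (";" : String).toList = [';'] from rfl]
        exact (PySem.Chars.isIn_iff_infix _ _).2 hinf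
    · exact ih toks stop h

-- splitOn with a one-char separator, structurally
def pvSplit (c : Char) : List Char → List (List Char)
  | [] => [[]]
  | x :: cs => if x = c then [] :: pvSplit c cs else (pvSplit c cs).modifyHead (x :: ·)

theorem pvModifyHead_id {α : Type} (l : List α) : List.modifyHead (fun x => x) l = l := by
  cases l <;> simp

theorem pvSplit_ne_nil (c : Char) (cs : List Char) : pvSplit c cs ≠ [] := by
  induction cs with
  | nil => simp [pvSplit]
  | cons x cs ih =>
    simp only [pvSplit]
    split_ifs
    · simp
    · cases h : pvSplit c cs
      · exact absurd h ih
      · simp [h]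

theorem pvGo (c : Char) : ∀ fuel l cur acc, l.length < fuel →
    PySem.Chars.splitOn.go [c] fuel l cur acc
      = acc.reverse ++ (pvSplit c l).modifyHead (cur.reverse ++ ·) := by
  intro fuel
  induction fuel with
  | zero => intro l cur acc h; omega
  | succ fuel ih =>
    intro l cur acc h
    cases l with
    | nil => simp [PySem.Chars.splitOn.go, pvSplit]
    | cons x rest =>
      by_cases hx : x = c
      · subst hx
        rw [show PySem.Chars.splitOn.go [x] (fuel + 1) (x :: rest) cur acc
              = PySem.Chars.splitOn.go [x] fuel (List.drop [x].length (x :: rest)) []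
                  (cur.reverse :: acc) from by
            simp [PySem.Chars.splitOn.go, List.isPrefixOf]]
        rw [ih _ _ _ (by simpa using Nat.lt_of_succ_lt_succ h)]
        simp only [pvSplit, if_pos rfl, List.reverse_cons, List.reverse_nil, List.nil_append]
        simp [pvModifyHead_id]
      · rw [show PySem.Chars.splitOn.go [c] (fuel + 1) (x :: rest) cur acc
              = PySem.Chars.splitOn.go [c] fuel rest (x :: cur) acc from by
            simp [PySem.Chars.splitOn.go, List.isPrefixOf, Ne.symm hx]]
        rw [ih _ _ _ (by simpa using Nat.lt_of_succ_lt_succ h)]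
        simp only [pvSplit, if_neg hx, List.modifyHead_modifyHead, List.reverse_cons]
        congr 1
        congr 1
        funext g
        simp [Function.comp]

theorem pvSplitOn_eq (c : Char) (cs : List Char) :
    PySem.Chars.splitOn cs [c] = pvSplit c cs := by
  rw [PySem.Chars.splitOn, pvGo c (cs.length + 1) cs [] [] (by omega)]
  simp [pvModifyHead_id]

theorem pvSplit_append (c : Char) (w cs : List Char) (hw : c ∉ w) :
    pvSplit c (w ++ cs) = (pvSplit c cs).modifyHead (w ++ ·) := by
  induction w with
  | nil => simp [pvModifyHead_id]
  | cons x w ih =>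
    have hx : x ≠ c := fun h => hw (h ▸ List.mem_cons_self)
    rw [List.cons_append]
    simp only [pvSplit, if_neg hx, ih (fun h => hw (List.mem_cons_of_mem _ h)),
      List.modifyHead_modifyHead]
    congr 1

-- the expression groups induced by a token list
def pvGroups : List (Option String) → List (List Char)
  | [] => [[]]
  | none :: ts => [] :: pvGroups ts
  | some w :: ts => (pvGroups ts).modifyHead (w.toList ++ ·)

theorem pvJoinNil (p : List Char) (ps : List (List Char)) :
    PySem.Chars.join [] (p :: ps) = p ++ PySem.Chars.join [] ps := by
  cases ps with
  | nil => simp [PySem.Chars.join_singleton, PySem.Chars.join_nil]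
  | cons q qs => rw [PySem.Chars.join_cons_cons]; simp

-- join + split(';') of σ-mapped tokens = the groups
theorem pvJoinSplit (ts : List (Option String)) (h : ∀ t ∈ ts, pvNoSemi t) :
    pvSplit ';' (PySem.Chars.join [] ((ts.map pvSig).map String.toList)) = pvGroups ts := by
  induction ts with
  | nil => simp [PySem.Chars.join_nil, pvSplit, pvGroups]
  | cons t ts ih =>
    have hts : ∀ t ∈ ts, pvNoSemi t := fun t ht => h t (List.mem_cons_of_mem _ ht)
    cases t with
    | none =>
      simp only [List.map_cons, pvJoinNil]
      rw [show (pvSig none).toList = [';'] from rfl]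
      simp only [List.cons_append, List.nil_append, pvSplit, pvGroups]
      rw [ih hts]
      simp
    | some w =>
      simp only [List.map_cons, pvJoinNil]
      rw [show (pvSig (some w)).toList = w.toList from rfl]
      rw [pvSplit_append ';' w.toList _ (h (some w) List.mem_cons_self w rfl), ih hts]
      rfl

theorem pvFilterErase (l : List String) :
    (l.erase "").filter (· ≠ "") = l.filter (· ≠ "") := by
  induction l with
  | nil => rfl
  | cons x xs ih =>
    by_cases hx : x = ""
    · subst hx; simp [List.erase_cons]
    · rw [List.erase_cons, if_neg (by simpa using hx)]
      simp only [List.filter_cons]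
      rw [ih]

theorem pvRemoveEmpty_eq_filter (l : List String) : pvRemoveEmpty l = l.filter (· ≠ "") := by
  rw [pvRemoveEmpty]
  by_cases h : "" ∈ l
  · rw [dif_pos h, PySem.List.remove?_eq_some_erase l "" h]
    have hlt : (l.erase "").length < l.length := by
      have h1 := List.length_erase_of_mem h
      have h2 := List.length_pos_of_mem h
      omega
    calc _ = pvRemoveEmpty (l.erase "") := rfl
      _ = (l.erase "").filter (· ≠ "") := pvRemoveEmpty_eq_filter (l.erase "")
      _ = l.filter (· ≠ "") := pvFilterErase l
  · rw [dif_neg h, List.filter_eq_self.2]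
    intro a ha
    simp only [ne_eq, decide_eq_true_eq]
    intro he; subst he; exact h ha
termination_by l.length

-- one split/join pass of A = replacing that operator char everywhere
def pvApply1 (c : Char) (cs : List Char) : List Char :=
  PySem.Chars.join [' ', c, ' '] (pvSplit c cs)

theorem pvJoin_modifyHead (sep : List Char) (x : Char) (g : List Char) (gs : List (List Char)) :
    PySem.Chars.join sep ((g :: gs).modifyHead (x :: ·)) = x :: PySem.Chars.join sep (g :: gs) := by
  cases gs with
  | nil => simp [PySem.Chars.join_singleton]
  | cons q qs =>
    simp only [List.modifyHead_cons, PySem.Chars.join_cons_cons]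
    simp

theorem pvApply1_eq (c : Char) (cs : List Char) :
    pvApply1 c cs = cs.flatMap (fun x => if x = c then [' ', c, ' '] else [x]) := by
  induction cs with
  | nil => simp [pvApply1, pvSplit, PySem.Chars.join_singleton]
  | cons x cs ih =>
    obtain ⟨g, gs, hgs⟩ : ∃ g gs, pvSplit c cs = g :: gs := by
      cases hh : pvSplit c cs
      · exact absurd hh (pvSplit_ne_nil c cs)
      · exact ⟨_, _, rfl⟩
    by_cases hx : x = c
    · subst hx
      rw [pvApply1, show pvSplit x (x :: cs) = [] :: pvSplit x cs from by simp [pvSplit],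
        hgs, PySem.Chars.join_cons_cons,
        show PySem.Chars.join [' ', x, ' '] (g :: gs) = pvApply1 x cs from by rw [pvApply1, hgs],
        ih]
      simp
    · rw [pvApply1, show pvSplit c (x :: cs) = (pvSplit c cs).modifyHead (x :: ·) from by
          simp [pvSplit, hx],
        hgs, List.modifyHead_cons,
        show ((x :: g) :: gs) = ((g :: gs).modifyHead (x :: ·)) from rfl,
        pvJoin_modifyHead,
        show PySem.Chars.join [' ', c, ' '] (g :: gs) = pvApply1 c cs from by rw [pvApply1, hgs],
        ih]
      simp [hx]

def pvSpS (S : List Char) (cs : List Char) : List Char :=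
  cs.flatMap (fun x => if x ∈ S then [' ', x, ' '] else [x])

theorem pvStep (S : List Char) (c : Char) (cs : List Char)
    (hc : c ∉ S) (hsp : c ≠ ' ') (hS : ' ' ∉ S) :
    pvApply1 c (pvSpS S cs) = pvSpS (S ++ [c]) cs := by
  rw [pvApply1_eq]
  induction cs with
  | nil => rfl
  | cons x cs ih =>
    simp only [pvSpS, List.flatMap_cons, List.flatMap_append] at *
    rw [ih]
    congr 1
    by_cases hx : x ∈ S
    · have hxc : x ≠ c := fun h => hc (h ▸ hx)
      rw [if_pos hx, if_pos (List.mem_append_left _ hx)]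
      simp [List.flatMap_cons, if_neg (Ne.symm hsp), if_neg hxc]
    · rw [if_neg hx]
      by_cases hxc : x = c
      · subst hxc
        rw [if_pos (List.mem_append_right _ List.mem_cons_self)]
        simp
      · rw [if_neg (by simp [hx, hxc])]
        simp [List.flatMap_cons, if_neg hxc]

-- one Str-level pass of A's fold, on the toList side
theorem pvStrStep (op : String) (c : Char) (hop : op.toList = [c]) (e : String) :
    (PySem.Str.join (" " ++ op ++ " ") ((PySem.Str.split? e op).getD [])).toList
      = pvApply1 c e.toList := by
  have hsep : (" " ++ op ++ " ").toList = [' ', c, ' '] := by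
    rw [String.toList_append, String.toList_append, hop]; rfl
  have hsplit : PySem.Str.split? e op = some ((pvSplit c e.toList).map String.ofList) := by
    rw [PySem.Str.split?, hop, PySem.Chars.split?]
    simp [pvSplitOn_eq]
  rw [hsplit]
  simp only [Option.getD_some]
  rw [PySem.Str.toList_join, hsep, pvApply1]
  congr 1
  rw [List.map_map]
  have hco : (String.toList ∘ String.ofList) = fun l : List Char => l := by
    funext l; simp [Function.comp, String.toList_ofList]
  rw [hco]
  exact List.map_id' _

theorem pvChain : ∀ (ops : List Char) (S g : List Char), ' ' ∉ S → ' ' ∉ ops →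
    (S ++ ops).Nodup →
    ops.foldl (fun cs c => pvApply1 c cs) (pvSpS S g) = pvSpS (S ++ ops) g := by
  intro ops
  induction ops with
  | nil => intro S g _ _ _; rw [List.foldl_nil, List.append_nil]
  | cons c ops ih =>
    intro S g hS hops hnd
    have hc : c ∉ S := by
      intro h
      exact (List.disjoint_of_nodup_append hnd) h List.mem_cons_self
    have hsp : c ≠ ' ' := fun h => hops (h ▸ List.mem_cons_self)
    rw [List.foldl_cons, pvStep S c g hc hsp hS,
      ih (S ++ [c]) g (by simp [hS, Ne.symm hsp])
        (fun h => hops (List.mem_cons_of_mem _ h))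
        (by simpa using hnd)]
    simp

-- A's 7-pass operator fold = B's one-pass spacing
theorem pvSpaceA_toList (g : List Char) : (pvSpaceA (String.ofList g)).toList = pvSpaceB g := by
  rw [pvSpaceA, pvOpsA]
  simp only [List.foldl_cons, List.foldl_nil]
  rw [pvStrStep ")" ')' rfl, pvStrStep "(" '(' rfl, pvStrStep "=" '=' rfl, pvStrStep "/" '/' rfl,
    pvStrStep "*" '*' rfl, pvStrStep "-" '-' rfl, pvStrStep "+" '+' rfl, String.toList_ofList]
  have h0 : g = pvSpS [] g := by simp [pvSpS]
  have := pvChain ['+', '-', '*', '/', '=', '(', ')'] [] g (by decide) (by decide) (by decide)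
  simp only [List.foldl_cons, List.foldl_nil, List.nil_append] at this
  rw [h0, this]
  simp [pvSpS, pvSpaceB, pvOpsB]

theorem pvSpaceA_eq (g : List Char) : pvSpaceA (String.ofList g) = String.ofList (pvSpaceB g) := by
  have h := congrArg String.ofList (pvSpaceA_toList g)
  rwa [String.ofList_toList] at h

-- the flush loop = spaced non-empty groups
theorem pvFlushB_eq (ts : List (Option String)) : ∀ exprs buf,
    pvFlushB ts exprs buf
      = exprs ++ (((pvGroups ts).modifyHead (buf ++ ·)).filter (· ≠ [])).map
          (fun g => String.ofList (pvSpaceB g)) := by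
  induction ts with
  | nil =>
    intro exprs buf
    by_cases hb : buf = []
    · subst hb; simp [pvFlushB, pvGroups]
    · simp [pvFlushB, pvGroups, hb, List.isEmpty_iff]
  | cons t ts ih =>
    intro exprs buf
    cases t with
    | none =>
      have hid : (pvGroups ts).modifyHead (([] : List Char) ++ ·) = pvGroups ts := by
        simpa using pvModifyHead_id (pvGroups ts)
      by_cases hb : buf = []
      · subst hb
        rw [show pvFlushB (none :: ts) exprs [] = pvFlushB ts exprs [] from by
            simp [pvFlushB]]
        rw [ih exprs []]
        simp only [pvGroups, List.filter_cons]
        simp [pvModifyHead_id]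
      · rw [show pvFlushB (none :: ts) exprs buf
              = pvFlushB ts (exprs ++ [String.ofList (pvSpaceB buf)]) [] from by
            simp [pvFlushB, List.isEmpty_iff, hb]]
        rw [ih _ []]
        simp only [pvGroups, List.filter_cons]
        simp [pvModifyHead_id, hb]
    | some w =>
      rw [show pvFlushB (some w :: ts) exprs buf = pvFlushB ts exprs (buf ++ w.toList) from rfl]
      rw [ih exprs (buf ++ w.toList)]
      congr 2
      rw [show (pvGroups (some w :: ts)) = (pvGroups ts).modifyHead (w.toList ++ ·) from rfl,
        List.modifyHead_modifyHead]
      have hfun : ((fun x => buf ++ x) ∘ fun x => w.toList ++ x)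
          = (fun x => buf ++ w.toList ++ x) := by
        funext x; simp [Function.comp, List.append_assoc]
      rw [hfun]

-- A's whole post-processing chain on σ-mapped tokens = the flush
set_option maxHeartbeats 1000000 in
theorem pvPost_eq (ts : List (Option String)) (h : ∀ t ∈ ts, pvNoSemi t) :
    (pvRemoveEmpty ((PySem.Str.split? (PySem.Str.join "" (ts.map pvSig)) ";").getD [])).map pvSpaceA
      = pvFlushB ts [] [] := by
  have hjoin : (PySem.Str.join "" (ts.map pvSig)).toList
      = PySem.Chars.join [] ((ts.map pvSig).map String.toList) := by
    rw [PySem.Str.toList_join]; rfl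
  have hsplit : PySem.Str.split? (PySem.Str.join "" (ts.map pvSig)) ";"
      = some ((pvGroups ts).map String.ofList) := by
    rw [PySem.Str.split?, show (";" : String).toList = [';'] from rfl, PySem.Chars.split?]
    simp only [List.isEmpty_cons, if_neg Bool.false_ne_true, Option.map_some]
    rw [pvSplitOn_eq, hjoin, pvJoinSplit ts h]
  rw [hsplit]
  simp only [Option.getD_some]
  rw [pvRemoveEmpty_eq_filter, List.filter_map, pvFlushB_eq ts [] []]
  have hid : (pvGroups ts).modifyHead (([] : List Char) ++ ·) = pvGroups ts := by
    simpa using pvModifyHead_id (pvGroups ts)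
  rw [hid, List.map_map, List.nil_append]
  have hpred : ((fun x : String => decide (x ≠ "")) ∘ String.ofList)
      = (fun g : List Char => decide (g ≠ [])) := by
    funext g
    by_cases hg : g = []
    · subst hg; rfl
    · have hne : String.ofList g ≠ "" := fun he => by
        have h2 := congrArg String.toList he
        rw [String.toList_ofList] at h2
        exact hg (by simpa using h2)
      simp [Function.comp, hg, hne]
  rw [hpred]
  simp only [Function.comp_def]
  exact List.map_congr_left (fun a _ => pvSpaceA_eq a)

theorem pvRunsT_noSemi (tail : List String) : ∀ n s, ∀ t ∈ (pvRunsT tail n s).1, pvNoSemi t := by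
  intro n
  induction n with
  | zero => intro s t ht; cases ht
  | succ n ih =>
    intro s t ht
    rcases List.mem_append.1 ht with ht | ht
    · exact pvScanB_noSemi tail [] s (by intro t ht; cases ht) t ht
    · exact ih (pvFin tail s) t ht

theorem pvMain (text : List String) : get_expressions text = get_expressions_alt text := by
  cases hidx : PySem.List.index? text "begin" with
  | none =>
    have hnm : "begin" ∉ text := (PySem.List.index?_eq_none_iff text "begin").1 hidx
    have hA : pvOuterA text text ([], false) = ([], false) := pvOuterA_no_begin text text _ hnm
    have hB : pvOuterB text text ([], [], false) = ([], [], false) :=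
      pvOuterB_no_begin text text _ hnm
    have hpost := pvPost_eq [] (by intro t ht; cases ht)
    simp only [List.map_nil] at hpost
    rw [get_expressions, get_expressions_alt, hA, hB]
    rw [show (([], false) : List String × Bool).1 = ([] : List String) from rfl, hpost]
    simp [pvFlushB, pvFlush1]
  | some k =>
    have houtA := pvOuterA_eq_runs text k hidx text [] false
    have houtB := pvOuterB_eq_runs text k hidx text [] [] false
    set tail := text.drop (k + 1) with htail
    set T : List (Option String) := (pvRunsT tail (text.count "begin") false).1 with hT
    have hno : ∀ t ∈ T, pvNoSemi t := pvRunsT_noSemi tail _ false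
    have htok : (pvOuterA text text ([], false)).1 = T.map pvSig := by
      rw [houtA]; simp
    rw [get_expressions, htok, pvPost_eq T hno, get_expressions_alt, houtB,
      pvFlushB_viaSt]

-- ===== VERDICT (by name: the statement is the Claim_ definition above) =====
theorem get_expressions_spec : Claim_equal_get_expressions := by
  intro text _
  exact pvMain text
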